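-- pv_equiv track=rewrite | github.com/JMackin/CodeArchive | Python/week5lab.py | list_at_index
-- ===== SOURCE A (Python) =====
-- def list_at_index(the_tuple_abomination, the_index):
--     the_list = []
--     for i in the_tuple_abomination:
--         if len(i) > the_index:
--             the_list.append(i[the_index])
--         else:
--             the_list = []
--             break
--     return the_list
-- ===== SOURCE B (Python) =====
-- def list_at_index(the_tuple_abomination, the_index):
--     if all(len(i) > the_index for i in the_tuple_abomination):
--         return [i[the_index] for i in the_tuple_abomination]
--     return []
-- ===== Notes on version B (the rewrite author's own statement) =====
-- stated objective: simpler
-- what changed: Replaced A's single incremental append loop with reset-and-break by a validate-then-build pair of passes: an all() check followed by a comprehension.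
-- outside the precondition, e.g. on list_at_index(([],), -1): A raises IndexError, B raises IndexError
import Mathlib
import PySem

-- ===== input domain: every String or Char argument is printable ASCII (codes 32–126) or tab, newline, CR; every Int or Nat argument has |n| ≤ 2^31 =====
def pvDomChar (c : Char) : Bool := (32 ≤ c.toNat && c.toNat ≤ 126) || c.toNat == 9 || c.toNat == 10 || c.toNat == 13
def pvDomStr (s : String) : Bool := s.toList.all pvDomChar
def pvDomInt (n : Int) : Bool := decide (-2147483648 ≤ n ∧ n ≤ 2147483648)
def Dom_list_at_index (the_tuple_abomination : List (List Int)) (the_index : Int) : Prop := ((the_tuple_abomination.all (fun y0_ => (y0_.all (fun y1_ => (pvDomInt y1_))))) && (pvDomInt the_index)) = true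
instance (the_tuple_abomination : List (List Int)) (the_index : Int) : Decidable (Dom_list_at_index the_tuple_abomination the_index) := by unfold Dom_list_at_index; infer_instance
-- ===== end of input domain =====

-- B replaces A's incremental append loop (with reset-and-break) by a validate-then-build
-- pair of passes (all-check, then comprehension); objective: simpler.

-- ===== PORT A =====
-- the for-loop with `the_list` accumulator, early `the_list = []; break` on failure
def listAtIndexLoop (the_index : Int) : List (List Int) → List Int → List Int
  | [], the_list => the_list
  | i :: rest, the_list =>
    if (i.length : Int) > the_index then
      match PySem.List.pyGet? i the_index with
      | some v => listAtIndexLoop the_index rest (the_list ++ [v])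
      | none => []   -- IndexError (negative index into a too-short sublist); excluded by Pre_
    else []

def list_at_index (the_tuple_abomination : List (List Int)) (the_index : Int) : List Int :=
  listAtIndexLoop the_index the_tuple_abomination []

-- ===== PORT B =====
def list_at_index_alt (the_tuple_abomination : List (List Int)) (the_index : Int) : List Int :=
  if the_tuple_abomination.all (fun i => (i.length : Int) > the_index) then
    the_tuple_abomination.map (fun i => (PySem.List.pyGet? i the_index).getD 0)  -- under Pre_ every pyGet? is some
  else []

-- ===== PRECONDITION & SPEC =====
-- Pre_ excludes exactly the inputs where Python A raises IndexError: a negative index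
-- together with some sublist shorter than |the_index| (the length test passes for any
-- negative index, so i[the_index] is then evaluated on every sublist).
def Pre_list_at_index (the_tuple_abomination : List (List Int)) (the_index : Int) : Prop :=
  0 ≤ the_index ∨ ∀ i ∈ the_tuple_abomination, -the_index ≤ (i.length : Int)
instance (the_tuple_abomination : List (List Int)) (the_index : Int) : Decidable (Pre_list_at_index the_tuple_abomination the_index) := by unfold Pre_list_at_index; infer_instance

def pvWitness_list_at_index : List (List Int) × Int := ([[1, 2], [3, 4], [5]], 0)

def Spec_list_at_index (the_tuple_abomination : List (List Int)) (the_index : Int) (out : List Int) : Prop := out = list_at_index_alt the_tuple_abomination the_index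
instance (the_tuple_abomination : List (List Int)) (the_index : Int) (out : List Int) : Decidable (Spec_list_at_index the_tuple_abomination the_index out) := by unfold Spec_list_at_index; infer_instance

-- ===== CLAIM (what is proved, stated in full; the proofs are below) =====
def Claim_equal_list_at_index : Prop := ∀ (the_tuple_abomination : List (List Int)) (the_index : Int), Dom_list_at_index the_tuple_abomination the_index → Pre_list_at_index the_tuple_abomination the_index → Spec_list_at_index the_tuple_abomination the_index (list_at_index the_tuple_abomination the_index)

-- ===== LEMMAS AND PROOFS =====

-- Under Pre_, whenever the length test passes, the index is actually valid.
theorem pyGet?_isSome_of_pre (i : List Int) (idx : Int)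
    (hlen : (i.length : Int) > idx) (h : 0 ≤ idx ∨ -idx ≤ (i.length : Int)) :
    (PySem.List.pyGet? i idx).isSome := by
  rw [Option.isSome_iff_ne_none, Ne, PySem.List.pyGet?_eq_none_iff]
  simp only [PySem.Raise.InRange]
  omega

theorem listAtIndexLoop_spec (idx : Int) (xs : List (List Int)) (acc : List Int)
    (hpre : 0 ≤ idx ∨ ∀ i ∈ xs, -idx ≤ (i.length : Int)) :
    listAtIndexLoop idx xs acc =
      if xs.all (fun i => (i.length : Int) > idx) then
        acc ++ xs.map (fun i => (PySem.List.pyGet? i idx).getD 0)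
      else [] := by
  induction xs generalizing acc with
  | nil => simp [listAtIndexLoop]
  | cons i rest ih =>
    by_cases hlen : (i.length : Int) > idx
    · have hsome : (PySem.List.pyGet? i idx).isSome := by
        apply pyGet?_isSome_of_pre i idx hlen
        rcases hpre with h | h
        · exact Or.inl h
        · exact Or.inr (h i (by simp))
      obtain ⟨v, hv⟩ := Option.isSome_iff_exists.mp hsome
      have hrest : 0 ≤ idx ∨ ∀ j ∈ rest, -idx ≤ (j.length : Int) := by
        rcases hpre with h | h
        · exact Or.inl h
        · exact Or.inr fun j hj => h j (by simp [hj])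
      simp only [listAtIndexLoop, if_pos hlen, hv]
      rw [ih (acc ++ [v]) hrest]
      simp [hlen, hv, List.all_cons]
    · simp [listAtIndexLoop, List.all_cons, hlen]

-- ===== VERDICT (by name: the statement is the Claim_ definition above) =====
theorem list_at_index_spec : Claim_equal_list_at_index := by
  intro xs idx _ hpre
  unfold Spec_list_at_index list_at_index list_at_index_alt
  rw [listAtIndexLoop_spec idx xs [] hpre]
  simp
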